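-- pv_equiv track=rewrite | github.com/shakfu/midi-langs | scripts/prelude2c.py | remove_main_block
-- ===== SOURCE A (Python) =====
-- def remove_main_block(source, ext):
--     """Remove if __name__ == '__main__' blocks for Python."""
--     if ext != '.py':
--         return source
--
--     lines = source.split('\n')
--     result = []
--     include = True
--     for line in lines:
--         if line.startswith("if __name__ == "):
--             include = False
--         if include:
--             result.append(line)
--     return '\n'.join(result)
-- ===== SOURCE B (Python) =====
-- def remove_main_block(source, ext):
--     """Remove if __name__ == '__main__' blocks for Python."""
--     if ext != '.py':
--         return source
--     marker = "if __name__ == "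
--     if source.startswith(marker):
--         return ""
--     pos = source.find("\n" + marker)
--     return source if pos == -1 else source[:pos]
-- ===== Notes on version B (the rewrite author's own statement) =====
-- stated objective: alternative
-- what changed: B never builds a line list: it works on the raw string, checking whether the source itself starts with the marker and otherwise substring-searching for '\n'+marker and slicing the string at that position, instead of A's split-into-lines flag-gated accumulate-and-join loop.
import Mathlib
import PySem

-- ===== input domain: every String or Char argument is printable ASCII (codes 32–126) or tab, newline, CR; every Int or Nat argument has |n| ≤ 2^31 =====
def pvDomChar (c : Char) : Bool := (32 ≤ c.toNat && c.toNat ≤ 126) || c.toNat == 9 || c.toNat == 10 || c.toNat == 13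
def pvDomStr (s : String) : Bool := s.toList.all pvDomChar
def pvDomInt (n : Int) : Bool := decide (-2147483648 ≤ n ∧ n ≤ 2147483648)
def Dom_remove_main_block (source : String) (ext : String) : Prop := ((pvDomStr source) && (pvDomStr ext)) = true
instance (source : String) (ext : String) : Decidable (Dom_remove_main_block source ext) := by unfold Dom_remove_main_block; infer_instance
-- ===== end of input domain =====

-- B works on the raw string (startswith check + substring search for "\n"+marker + slice) instead of
-- A's split-into-lines flag-gated accumulate-and-join loop; objective: alternative.

-- ===== PORT A =====
-- flag-gated accumulation: incl flips to false at the first matching line and stays false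
def pvStep (p : String → Bool) (st : List String × Bool) (line : String) : List String × Bool :=
  let incl := if p line then false else st.2
  (if incl then st.1 ++ [line] else st.1, incl)

def remove_main_block (source : String) (ext : String) : String :=
  if ext ≠ ".py" then source else
  let lines := (PySem.Str.split? source "\n").getD []
  let st := lines.foldl (pvStep (fun line => PySem.Str.startswith line "if __name__ == ")) ([], true)
  PySem.Str.join "\n" st.1

-- ===== PORT B =====
-- no line list: check the marker at the very start, else substring-search "\n"+marker and slice there
def remove_main_block_alt (source : String) (ext : String) : String :=
  if ext ≠ ".py" then source else
  if PySem.Str.startswith source "if __name__ == " then "" else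
  let pos := PySem.Str.find source "\nif __name__ == "
  if pos = -1 then source else PySem.Str.slice source none (some pos)

-- ===== PRECONDITION & SPEC =====
def Spec_remove_main_block (source : String) (ext : String) (out : String) : Prop := out = remove_main_block_alt source ext
instance (source : String) (ext : String) (out : String) : Decidable (Spec_remove_main_block source ext out) := by unfold Spec_remove_main_block; infer_instance

-- ===== CLAIM (what is proved, stated in full; the proofs are below) =====
def Claim_equal_remove_main_block : Prop := ∀ (source : String) (ext : String), Dom_remove_main_block source ext → Spec_remove_main_block source ext (remove_main_block source ext)

-- ===== LEMMAS AND PROOFS =====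

-- A's flag-gated loop accumulates exactly the lines before the first match
theorem foldl_false_fst (p : String → Bool) (ls : List String) (acc : List String) :
    (ls.foldl (pvStep p) (acc, false)).1 = acc := by
  induction ls generalizing acc with
  | nil => rfl
  | cons h t ih =>
    rw [List.foldl_cons]
    have : pvStep p (acc, false) h = (acc, false) := by
      unfold pvStep; split_ifs <;> simp_all
    rw [this, ih]

theorem foldl_true_fst (p : String → Bool) (ls : List String) (acc : List String) :
    (ls.foldl (pvStep p) (acc, true)).1 = acc ++ ls.takeWhile (fun l => ! p l) := by
  induction ls generalizing acc with
  | nil => simp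
  | cons h t ih =>
    rw [List.foldl_cons, List.takeWhile_cons]
    by_cases hp : p h
    · have : pvStep p (acc, true) h = (acc, false) := by unfold pvStep; simp [hp]
      rw [this, foldl_false_fst]; simp [hp]
    · have : pvStep p (acc, true) h = (acc ++ [h], true) := by unfold pvStep; simp [hp]
      rw [this, ih]; simp [hp]

-- splitOn.go step equations
theorem sgo_zero (sep l cur : List Char) (acc : List (List Char)) :
    PySem.Chars.splitOn.go sep 0 l cur acc = ((cur.reverse ++ l) :: acc).reverse := rfl

theorem sgo_succ_nil (sep cur : List Char) (fuel : Nat) (acc : List (List Char)) :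
    PySem.Chars.splitOn.go sep (fuel + 1) [] cur acc = (cur.reverse :: acc).reverse := rfl

theorem sgo_succ_cons (sep cur : List Char) (fuel : Nat) (ch : Char) (rest : List Char) (acc : List (List Char)) :
    PySem.Chars.splitOn.go sep (fuel + 1) (ch :: rest) cur acc =
      if sep.isPrefixOf (ch :: rest) then
        PySem.Chars.splitOn.go sep fuel (List.drop sep.length (ch :: rest)) [] (cur.reverse :: acc)
      else PySem.Chars.splitOn.go sep fuel rest (ch :: cur) acc := rfl

-- scan of a separator-free string grabs the rest as one final piece (any fuel)
theorem sgo_no_sep (c : Char) (l : List Char) (hl : c ∉ l) :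
    ∀ (fuel : Nat) (cur : List Char) (acc : List (List Char)),
      PySem.Chars.splitOn.go [c] fuel l cur acc = acc.reverse ++ [cur.reverse ++ l] := by
  induction l with
  | nil =>
    intro fuel cur acc
    cases fuel with
    | zero => simp [sgo_zero]
    | succ f => simp [sgo_succ_nil]
  | cons ch rest ih =>
    intro fuel cur acc
    have hne : ¬ ([c].isPrefixOf (ch :: rest)) := by
      simp only [List.mem_cons, not_or] at hl
      simp [List.isPrefixOf, hl.1]
    cases fuel with
    | zero => simp [sgo_zero]
    | succ f =>
      rw [sgo_succ_cons, if_neg hne, ih (by intro h; exact hl (List.mem_cons_of_mem _ h)) f]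
      simp

-- scanning past a separator-free prefix up to the first separator
theorem sgo_to_sep (c : Char) (pre : List Char) (hpre : c ∉ pre) (rest : List Char) :
    ∀ (fuel : Nat) (cur : List Char) (acc : List (List Char)),
      PySem.Chars.splitOn.go [c] (fuel + pre.length + 1) (pre ++ c :: rest) cur acc =
        PySem.Chars.splitOn.go [c] fuel rest [] ((cur.reverse ++ pre) :: acc) := by
  induction pre with
  | nil =>
    intro fuel cur acc
    have hp : ([c].isPrefixOf (c :: rest)) := by simp [List.isPrefixOf]
    simp only [List.nil_append, List.length_nil, Nat.add_zero]
    rw [sgo_succ_cons, if_pos hp]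
    simp
  | cons p ps ih =>
    intro fuel cur acc
    have hne : ¬ ([c].isPrefixOf (p :: (ps ++ c :: rest))) := by
      simp only [List.mem_cons, not_or] at hpre
      simp [hpre.1]
    have h1 : fuel + (p :: ps).length + 1 = (fuel + ps.length + 1) + 1 := by simp; omega
    rw [h1, show (p :: ps) ++ c :: rest = p :: (ps ++ c :: rest) from rfl,
        sgo_succ_cons, if_neg hne,
        ih (by intro h; exact hpre (List.mem_cons_of_mem _ h)) fuel (p :: cur) acc]
    simp

-- accumulator extraction for splitOn.go
theorem sgo_acc (c : Char) :
    ∀ (fuel : Nat) (l cur : List Char) (acc : List (List Char)),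
      PySem.Chars.splitOn.go [c] fuel l cur acc =
        acc.reverse ++ PySem.Chars.splitOn.go [c] fuel l cur [] := by
  intro fuel
  induction fuel with
  | zero => intro l cur acc; simp [sgo_zero]
  | succ f ih =>
    intro l cur acc
    cases l with
    | nil => simp [sgo_succ_nil]
    | cons ch rest =>
      rw [sgo_succ_cons, sgo_succ_cons]
      by_cases hp : ([c].isPrefixOf (ch :: rest))
      · rw [if_pos hp, if_pos hp, ih _ _ (cur.reverse :: acc), ih _ _ ([cur.reverse])]
        simp
      · rw [if_neg hp, if_neg hp, ih _ _ acc]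

-- splitOn on a separator-free string
theorem splitOn_no_sep (c : Char) (s : List Char) (hs : c ∉ s) :
    PySem.Chars.splitOn s [c] = [s] := by
  unfold PySem.Chars.splitOn
  rw [sgo_no_sep c s hs]
  simp

-- splitOn peels the first separator-free piece
theorem splitOn_break (c : Char) (pre : List Char) (hpre : c ∉ pre) (rest : List Char) :
    PySem.Chars.splitOn (pre ++ c :: rest) [c] = pre :: PySem.Chars.splitOn rest [c] := by
  unfold PySem.Chars.splitOn
  have hlen : (pre ++ c :: rest).length + 1 = (rest.length + 1) + pre.length + 1 := by
    simp; omega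
  rw [hlen, sgo_to_sep c pre hpre rest (rest.length + 1) [] [], sgo_acc]
  simp

-- find.go step equations
theorem fgo_nil (sub : List Char) (k : Nat) :
    PySem.Chars.find.go sub [] k = if sub.isEmpty then (k : Int) else -1 := rfl

theorem fgo_cons (sub : List Char) (a : Char) (l : List Char) (k : Nat) :
    PySem.Chars.find.go sub (a :: l) k =
      if sub.isPrefixOf (a :: l) then (k : Int) else PySem.Chars.find.go sub l (k + 1) := rfl

-- the start offset only shifts a successful result
theorem fgo_shift (sub : List Char) :
    ∀ (l : List Char) (k : Nat),
      PySem.Chars.find.go sub l k =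
        if PySem.Chars.find.go sub l 0 = -1 then -1 else PySem.Chars.find.go sub l 0 + k := by
  intro l
  induction l with
  | nil =>
    intro k
    rw [fgo_nil, fgo_nil]
    by_cases h : sub.isEmpty <;> simp [h]
  | cons a t ih =>
    intro k
    rw [fgo_cons, fgo_cons]
    by_cases hp : sub.isPrefixOf (a :: t)
    · simp [hp]
    · rw [if_neg hp, if_neg hp, ih (k + 1), ih 1]
      by_cases h0 : PySem.Chars.find.go sub t 0 = -1
      · simp [h0]
      · have hge : (0:Int) ≤ PySem.Chars.find.go sub t 0 := by
          have := PySem.Chars.neg_one_le_find t sub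
          unfold PySem.Chars.find at this
          omega
        have hne : ¬ (PySem.Chars.find.go sub t 0 + 1 = -1) := by omega
        simp only [h0, if_false]
        push_cast
        omega

-- the scan skips a prefix free of the pattern's head character
theorem fgo_skip (c : Char) (m : List Char) (pre : List Char) (hpre : c ∉ pre) (l : List Char) :
    ∀ (k : Nat),
      PySem.Chars.find.go (c :: m) (pre ++ l) k = PySem.Chars.find.go (c :: m) l (k + pre.length) := by
  induction pre with
  | nil => intro k; simp
  | cons p ps ih =>
    intro k
    have hne : ¬ ((c :: m).isPrefixOf (p :: (ps ++ l))) := by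
      simp only [List.isPrefixOf_cons₂]
      simp only [List.mem_cons, not_or] at hpre
      simp [hpre.1]
    rw [show (p :: ps) ++ l = p :: (ps ++ l) from rfl, fgo_cons, if_neg hne,
        ih (by intro h; exact hpre (List.mem_cons_of_mem _ h)) (k + 1)]
    congr 1
    simp
    omega

-- expansion of find on the "virtual line start": find ('\n'::s) ('\n'::m)
theorem find_cons_expand (c : Char) (m s : List Char) :
    PySem.Chars.find (c :: s) (c :: m) =
      if m.isPrefixOf s then 0
      else if PySem.Chars.find s (c :: m) = -1 then -1 else PySem.Chars.find s (c :: m) + 1 := by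
  unfold PySem.Chars.find
  rw [fgo_cons]
  have : ((c :: m).isPrefixOf (c :: s)) = m.isPrefixOf s := by
    simp [List.isPrefixOf]
  rw [this]
  by_cases h : m.isPrefixOf s
  · simp [h]
  · rw [if_neg (by simp [h]), if_neg (by simp [h]), fgo_shift (c :: m) s 1]
    norm_num

-- a pattern without the separator is a prefix of s iff it is a prefix of s's first line
theorem isPrefixOf_takeWhile_iff (c : Char) (m : List Char) (hc : c ∉ m) (s : List Char) :
    m.isPrefixOf (s.takeWhile (fun x => x != c)) = m.isPrefixOf s := by
  induction m generalizing s with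
  | nil => simp [List.isPrefixOf_nil_left]
  | cons a t ih =>
    simp only [List.mem_cons, not_or] at hc
    cases s with
    | nil => simp
    | cons y ys =>
      by_cases hy : y = c
      · subst hy
        rw [List.takeWhile_cons]
        simp only [bne_self_eq_false, Bool.false_eq_true, if_false]
        have hay : (a == y) = false := by
          simp only [beq_eq_false_iff_ne, ne_eq]
          intro h; exact hc.1 h.symm
        simp [List.isPrefixOf, hay]
      · rw [List.takeWhile_cons]
        have : (y != c) = true := by simp [hy]
        rw [this]
        simp only [if_true, List.isPrefixOf_cons₂]
        rw [ih hc.2 ys]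

-- splitOn's first piece is the first line (takeWhile up to the separator)
theorem splitOn_head (c : Char) (s : List Char) :
    ∃ t, PySem.Chars.splitOn s [c] = (s.takeWhile (fun x => x != c)) :: t := by
  by_cases hs : c ∈ s
  · have hdw : s.dropWhile (fun x => x != c) ≠ [] := by
      intro h
      rw [List.dropWhile_eq_nil_iff] at h
      have := h c hs
      simp at this
    obtain ⟨d, rest, hd⟩ := List.exists_cons_of_ne_nil hdw
    have hdc : d = c := by
      have h2 := List.head?_dropWhile_not (fun x => x != c) s
      rw [hd] at h2
      simpa using h2
    have hsplit : s = (s.takeWhile (fun x => x != c)) ++ c :: rest := by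
      conv_lhs => rw [← List.takeWhile_append_dropWhile (p := fun x => x != c) (l := s)]
      rw [hd, hdc]
    have hpre : c ∉ s.takeWhile (fun x => x != c) := by
      intro h
      have := List.mem_takeWhile_imp h
      simp at this
    refine ⟨PySem.Chars.splitOn rest [c], ?_⟩
    conv_lhs => rw [hsplit]
    exact splitOn_break c _ hpre rest
  · have : s.takeWhile (fun x => x != c) = s := by
      rw [List.takeWhile_eq_self_iff]
      intro x hx
      simp only [bne_iff_ne, ne_eq]
      intro h; exact hs (h ▸ hx)
    rw [this, splitOn_no_sep c s hs]
    exact ⟨[], rfl⟩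

-- the heart: A's join-of-kept-lines equals the cut of s at the first match of c::m in c::s
theorem main_chars (c : Char) (m : List Char) (hm : m ≠ []) (hc : c ∉ m) :
    ∀ (n : Nat) (s : List Char), s.length ≤ n →
      PySem.Chars.join [c] ((PySem.Chars.splitOn s [c]).takeWhile
          (fun l => ! PySem.Chars.startswith l m)) =
        if PySem.Chars.find (c :: s) (c :: m) = -1 then s
        else s.take ((PySem.Chars.find (c :: s) (c :: m)).toNat - 1) := by
  intro n
  induction n with
  | zero =>
    intro s hs
    have hs0 : s = [] := List.eq_nil_of_length_eq_zero (Nat.le_zero.mp hs)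
    subst hs0
    obtain ⟨a, t, rfl⟩ := List.exists_cons_of_ne_nil hm
    rw [splitOn_no_sep c [] (by simp), find_cons_expand]
    have h1 : (a :: t).isPrefixOf ([] : List Char) = false := rfl
    have h2 : PySem.Chars.find [] (c :: a :: t) = -1 := rfl
    simp [h1, h2, PySem.Chars.startswith, PySem.Chars.join_singleton]
  | succ n ihn =>
    intro s hs
    by_cases hmem : c ∈ s
    · -- s = pre ++ c :: rest with c-free pre
      have hdw : s.dropWhile (fun x => x != c) ≠ [] := by
        intro h
        rw [List.dropWhile_eq_nil_iff] at h
        have := h c hmem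
        simp at this
      obtain ⟨d, rest, hd⟩ := List.exists_cons_of_ne_nil hdw
      have hdc : d = c := by
        have h2 := List.head?_dropWhile_not (fun x => x != c) s
        rw [hd] at h2
        simpa using h2
      rw [hdc] at hd
      have hseq : s = (s.takeWhile (fun x => x != c)) ++ c :: rest := by
        conv_lhs => rw [← List.takeWhile_append_dropWhile (p := fun x => x != c) (l := s)]
        rw [hd]
      set pre := s.takeWhile (fun x => x != c) with hpre_def
      have hpre : c ∉ pre := by
        intro h
        have := List.mem_takeWhile_imp h
        simp at this
      have hrest : rest.length ≤ n := by
        have := congrArg List.length hseq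
        simp at this
        omega
      set f := PySem.Chars.find (c :: rest) (c :: m) with hf_def
      have hf1 : -1 ≤ f := PySem.Chars.neg_one_le_find _ _
      have hfind_s : PySem.Chars.find s (c :: m) = if f = -1 then -1 else f + pre.length := by
        conv_lhs => rw [hseq]
        show PySem.Chars.find.go (c :: m) (pre ++ c :: rest) 0 = _
        rw [fgo_skip c m pre hpre (c :: rest) 0, fgo_shift]
        show (if PySem.Chars.find (c :: rest) (c :: m) = -1 then -1
              else PySem.Chars.find (c :: rest) (c :: m) + ((0 : Nat) + pre.length : Nat)) = _
        rw [← hf_def]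
        by_cases hf : f = -1
        · simp [hf]
        · rw [if_neg hf, if_neg hf]
          push_cast
          ring
      have hprefix_iff : m.isPrefixOf pre = m.isPrefixOf s := by
        rw [hpre_def]
        exact isPrefixOf_takeWhile_iff c m hc s
      have hexp : PySem.Chars.find (c :: s) (c :: m) =
          if m.isPrefixOf s then 0 else if f = -1 then -1 else f + pre.length + 1 := by
        rw [find_cons_expand, hfind_s]
        by_cases hms : m.isPrefixOf s
        · simp [hms]
        · have hms' : m.isPrefixOf s = false := (Bool.eq_false_iff).mpr hms
          simp only [hms', Bool.false_eq_true, if_false]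
          by_cases hf : f = -1
          · simp [hf]
          · have h3 : ¬ (f + (pre.length : Int) = -1) := by omega
            rw [if_neg hf, if_neg h3, if_neg hf]
      have hf0 : (f = 0) = (m.isPrefixOf rest = true) := by
        rw [hf_def, find_cons_expand]
        by_cases hmr : m.isPrefixOf rest
        · simp [hmr]
        · have h1 : -1 ≤ PySem.Chars.find rest (c :: m) := PySem.Chars.neg_one_le_find _ _
          by_cases h2 : PySem.Chars.find rest (c :: m) = -1
          · simp [hmr, h2]
          · have h4 : ¬ (PySem.Chars.find rest (c :: m) + 1 = 0) := by omega
            simp [hmr, h2, h4]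
      obtain ⟨t2, ht2⟩ := splitOn_head c rest
      have hrtw : m.isPrefixOf (rest.takeWhile (fun x => x != c)) = m.isPrefixOf rest :=
        isPrefixOf_takeWhile_iff c m hc rest
      have ihr := ihn rest hrest
      conv_lhs => rw [hseq, splitOn_break c pre hpre rest]
      by_cases hms : m.isPrefixOf s
      · -- line 0 of s matches: everything is dropped
        have hpredpre : (! PySem.Chars.startswith pre m) = false := by
          simp [PySem.Chars.startswith, hprefix_iff, hms]
        rw [List.takeWhile_cons, hpredpre]
        simp only [Bool.false_eq_true, if_false, PySem.Chars.join_nil]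
        rw [hexp, if_pos hms]
        simp
      · have hpredpre : (! PySem.Chars.startswith pre m) = true := by
          simp [PySem.Chars.startswith, hprefix_iff, hms]
        rw [List.takeWhile_cons, hpredpre, if_pos rfl]
        rw [hexp, if_neg hms]
        by_cases hf : f = -1
        · -- no match anywhere: keep everything
          have hmr : m.isPrefixOf rest = false := by
            have h5 : ¬ (f = 0) := by omega
            rw [hf0] at h5
            exact (Bool.eq_false_iff).mpr h5
          have hpredr : (! PySem.Chars.startswith (rest.takeWhile (fun x => x != c)) m) = true := by
            simp [PySem.Chars.startswith, hrtw, hmr]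
          rw [ht2] at ihr ⊢
          rw [List.takeWhile_cons, hpredr, if_pos rfl] at ihr ⊢
          rw [PySem.Chars.join_cons_cons, ihr, if_pos hf, if_pos hf]
          rw [hseq]
          simp
        · by_cases hf0' : f = 0
          · -- the match is rest's first line: keep exactly pre
            have hmr : m.isPrefixOf rest = true := by rw [← hf0]; exact hf0'
            have hpredr : (! PySem.Chars.startswith (rest.takeWhile (fun x => x != c)) m) = false := by
              simp [PySem.Chars.startswith, hrtw, hmr]
            rw [ht2, List.takeWhile_cons, hpredr]
            simp only [Bool.false_eq_true, if_false, PySem.Chars.join_singleton]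
            have hne : ¬ ((f + (pre.length : Int) + 1) = -1) := by omega
            rw [if_neg hf, if_neg hne, hf0']
            have htn : ((0 : Int) + (pre.length : Int) + 1).toNat - 1 = pre.length := by omega
            rw [htn]
            conv_rhs => rw [hseq]
            exact (List.take_left).symm
          · -- the match is deeper in rest
            have hfpos : 1 ≤ f := by omega
            have hmr : m.isPrefixOf rest = false := by
              have h5 : ¬ (f = 0) := by omega
              rw [hf0] at h5
              exact (Bool.eq_false_iff).mpr h5
            have hpredr : (! PySem.Chars.startswith (rest.takeWhile (fun x => x != c)) m) = true := by
              simp [PySem.Chars.startswith, hrtw, hmr]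
            rw [ht2] at ihr ⊢
            rw [List.takeWhile_cons, hpredr, if_pos rfl] at ihr ⊢
            rw [PySem.Chars.join_cons_cons, ihr, if_neg hf]
            have hne : ¬ ((f + (pre.length : Int) + 1) = -1) := by omega
            rw [if_neg hf, if_neg hne]
            have htn : (f + (pre.length : Int) + 1).toNat - 1 = pre.length + f.toNat := by omega
            rw [htn]
            conv_rhs => rw [hseq]
            rw [List.take_append]
            have h1 : List.take (pre.length + f.toNat) pre = pre :=
              List.take_of_length_le (by omega)
            have h2 : pre.length + f.toNat - pre.length = f.toNat := by omega
            rw [h1, h2]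
            obtain ⟨k, hk⟩ : ∃ k, f.toNat = k + 1 := ⟨f.toNat - 1, by omega⟩
            rw [hk, List.take_succ_cons]
            have : k = f.toNat - 1 := by omega
            rw [this]
            simp
    · -- no separator in s: a single line
      rw [splitOn_no_sep c s hmem, find_cons_expand]
      have hfs : PySem.Chars.find s (c :: m) = -1 := by
        rw [PySem.Chars.find_eq_neg_one_iff]
        intro hinf
        exact hmem (hinf.subset (List.mem_cons_self))
      by_cases hms : m.isPrefixOf s
      · have : (! PySem.Chars.startswith s m) = false := by
          simp [PySem.Chars.startswith, hms]
        rw [List.takeWhile_cons, this]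
        simp [hms, PySem.Chars.join_nil]
      · have : (! PySem.Chars.startswith s m) = true := by
          simp [PySem.Chars.startswith, hms]
        rw [List.takeWhile_cons, this, if_pos rfl]
        simp [hms, hfs, PySem.Chars.join_singleton]

-- ===== VERDICT (by name: the statement is the Claim_ definition above) =====
theorem remove_main_block_spec : Claim_equal_remove_main_block := by
  intro source ext _
  unfold Spec_remove_main_block remove_main_block remove_main_block_alt
  by_cases hext : ext ≠ ".py"
  · simp [hext]
  · simp only [hext, ite_false]
    set s := source.toList with hs_def
    set m := "if __name__ == ".toList with hm_def
    have hm : m ≠ [] := by decide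
    have hc : '\n' ∉ m := by decide
    have hsplit : (PySem.Str.split? source "\n").getD []
        = (PySem.Chars.splitOn s ['\n']).map String.ofList := by
      show (Option.map (List.map String.ofList) (PySem.Chars.split? s "\n".toList)).getD [] = _
      rw [show "\n".toList = ['\n'] from rfl]
      rw [PySem.Chars.split?]
      simp
    rw [hsplit, foldl_true_fst, List.nil_append, List.takeWhile_map]
    have hfun : ((fun l => ! PySem.Str.startswith l "if __name__ == ") ∘ String.ofList)
        = (fun l => ! PySem.Chars.startswith l m) := by
      funext l
      simp only [Function.comp_apply, PySem.Str.startswith, String.toList_ofList, hm_def]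
    rw [hfun]
    have hjoin : ∀ (L : List (List Char)), PySem.Str.join "\n" (L.map String.ofList)
        = String.ofList (PySem.Chars.join ['\n'] L) := by
      intro L
      show String.ofList (PySem.Chars.join "\n".toList ((L.map String.ofList).map String.toList)) = _
      rw [show "\n".toList = ['\n'] from rfl, List.map_map]
      congr 1
      simp [Function.comp_def]
    rw [hjoin, main_chars '\n' m hm hc s.length s le_rfl, find_cons_expand]
    have hsw : PySem.Str.startswith source "if __name__ == " = m.isPrefixOf s := rfl
    have hfind : PySem.Str.find source "\nif __name__ == " = PySem.Chars.find s ('\n' :: m) := rfl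
    by_cases hswb : m.isPrefixOf s = true
    · rw [if_pos hswb]
      rw [hsw, if_pos hswb]
      simp
    · rw [if_neg hswb, hsw, if_neg hswb]
      have hge : -1 ≤ PySem.Chars.find s ('\n' :: m) := PySem.Chars.neg_one_le_find _ _
      by_cases hf : PySem.Chars.find s ('\n' :: m) = -1
      · rw [if_pos hf, hfind, if_pos hf]
        simp [hs_def]
      · rw [if_neg hf, hfind, if_neg hf]
        have h0 : 0 ≤ PySem.Chars.find s ('\n' :: m) := by omega
        have hne1 : ¬ (PySem.Chars.find s ('\n' :: m) + 1 = -1) := by omega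
        rw [if_neg hne1]
        show _ = String.ofList (PySem.Chars.slice s none (some (PySem.Chars.find s ('\n' :: m))))
        rw [PySem.Chars.slice_eq_listSlice, PySem.List.slice_to _ h0]
        congr 2
        omega
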